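-- pv_equiv track=rewrite | github.com/oelbert/aoc_2023 | day1.py | get_number_from_mixed_reversed_text
-- ===== SOURCE A (Python) =====
-- alphanum = {
--     "zero": "0",
--     "one": "1",
--     "two": "2",
--     "three": "3",
--     "four": "4",
--     "five": "5",
--     "six": "6",
--     "seven": "7",
--     "eight": "8",
--     "nine": "9",
-- }
--
-- def get_number_from_mixed_reversed_text(text: str) -> str:
--     buff = ""
--     for character in text:
--         if character.isnumeric():
--             return character
--         else:
--             buff = character + buff
--             for key in alphanum.keys():
--                 if key in buff:
--                     return alphanum[key]
-- ===== SOURCE B (Python) =====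
-- # Staged passes instead of A's per-character buffer search: find the first digit's
-- # index in one scan, find each reversed digit word's first occurrence with str.find,
-- # then return whichever event completes earliest (digit wins a tie, as in A).
-- _REV_WORDS = [
--     ("orez", "0"), ("eno", "1"), ("owt", "2"), ("eerht", "3"), ("ruof", "4"),
--     ("evif", "5"), ("xis", "6"), ("neves", "7"), ("thgie", "8"), ("enin", "9"),
-- ]
--
-- def get_number_from_mixed_reversed_text(text: str) -> str:
--     first_digit = None
--     for i, ch in enumerate(text):
--         if ch.isdigit():
--             first_digit = (i, ch)
--             break
--     best = None  # (index where the word completes, its digit)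
--     for word, digit in _REV_WORDS:
--         p = text.find(word)
--         if p != -1 and (best is None or p + len(word) - 1 < best[0]):
--             best = (p + len(word) - 1, digit)
--     if first_digit is not None and (best is None or first_digit[0] <= best[0]):
--         return first_digit[1]
--     if best is not None:
--         return best[1]
--     return None
-- ===== Notes on version B (the rewrite author's own statement) =====
-- stated objective: faster
-- what changed: Replaces A's per-character loop that re-searches every digit word inside an ever-growing reversed buffer by staged passes: one scan for the first digit index plus one str.find per reversed word, combined by earliest completion index (digit first on ties).
import Mathlib
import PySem

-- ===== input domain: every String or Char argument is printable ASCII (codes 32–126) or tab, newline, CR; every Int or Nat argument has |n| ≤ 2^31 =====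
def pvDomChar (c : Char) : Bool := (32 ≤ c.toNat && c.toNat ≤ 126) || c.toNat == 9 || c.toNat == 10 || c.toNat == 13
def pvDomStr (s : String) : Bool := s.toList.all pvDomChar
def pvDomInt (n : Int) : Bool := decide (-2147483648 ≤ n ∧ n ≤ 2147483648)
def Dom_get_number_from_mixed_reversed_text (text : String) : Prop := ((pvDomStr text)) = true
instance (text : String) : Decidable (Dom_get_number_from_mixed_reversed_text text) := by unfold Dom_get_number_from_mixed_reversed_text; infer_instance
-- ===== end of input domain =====

-- B replaces A's per-character growing-buffer substring search by staged passes: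
-- first digit index + one find per reversed word, combined by earliest completion (objective: faster).

-- ===== PORT A =====
-- the module-level dict 'alphanum', in insertion order
def pvAlphanum : List (List Char × String) :=
  [("zero".toList, "0"), ("one".toList, "1"), ("two".toList, "2"), ("three".toList, "3"),
   ("four".toList, "4"), ("five".toList, "5"), ("six".toList, "6"), ("seven".toList, "7"),
   ("eight".toList, "8"), ("nine".toList, "9")]

-- A's loop; buff accumulates the characters read so far, newest first
def pvGoA : List Char → List Char → Option String
  | [], _ => none
  | c :: rest, buff =>
    -- character.isnumeric(): exact on the printable-ASCII domain, where it is '0'..'9'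
    if PySem.Chars.isdigit c then some (String.singleton c)
    else
      let buff' := c :: buff
      match pvAlphanum.find? (fun kv => PySem.Chars.isIn kv.1 buff') with
      | some kv => some kv.2          -- return alphanum[key]
      | none => pvGoA rest buff'

def get_number_from_mixed_reversed_text (text : String) : Option String :=
  pvGoA text.toList []

-- ===== PORT B =====
-- the module-level table _REV_WORDS of Source B (reversed digit words)
def pvRevWords : List (List Char × String) :=
  [("orez".toList, "0"), ("eno".toList, "1"), ("owt".toList, "2"), ("eerht".toList, "3"),
   ("ruof".toList, "4"), ("evif".toList, "5"), ("xis".toList, "6"), ("neves".toList, "7"),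
   ("thgie".toList, "8"), ("enin".toList, "9")]

-- the body of Source B's 'for word, digit in _REV_WORDS' loop
def pvBestStep (t : List Char) (best : Option (Int × String)) (wd : List Char × String) :
    Option (Int × String) :=
  let p := PySem.Chars.find t wd.1
  if p != -1 && best.elim true (fun b => decide (p + (wd.1.length : Int) - 1 < b.1)) then
    some (p + (wd.1.length : Int) - 1, wd.2)
  else best

def get_number_from_mixed_reversed_text_alt (text : String) : Option String :=
  let t := text.toList
  -- the enumerate loop: first (index, character) whose character is a digit
  let firstDigit := (PySem.List.enumerate t).find? (fun ic => PySem.Chars.isdigit ic.2)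
  -- the find loop: (completion index, digit) of the earliest-completing reversed word
  let best := pvRevWords.foldl (pvBestStep t) none
  match firstDigit, best with
  | some ic, none => some (String.singleton ic.2)
  | some ic, some b => if ic.1 ≤ b.1 then some (String.singleton ic.2) else some b.2
  | none, some b => some b.2
  | none, none => none

-- ===== PRECONDITION & SPEC =====
def Spec_get_number_from_mixed_reversed_text (text : String) (out : Option String) : Prop := out = get_number_from_mixed_reversed_text_alt text
instance (text : String) (out : Option String) : Decidable (Spec_get_number_from_mixed_reversed_text text out) := by unfold Spec_get_number_from_mixed_reversed_text; infer_instance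

-- ===== CLAIM (what is proved, stated in full; the proofs are below) =====
def Claim_equal_get_number_from_mixed_reversed_text : Prop := ∀ (text : String), Dom_get_number_from_mixed_reversed_text text → Spec_get_number_from_mixed_reversed_text text (get_number_from_mixed_reversed_text text)

-- ===== LEMMAS AND PROOFS =====

-- reference scan: position-indexed form of A's loop ("at index j and beyond,
-- first position with a digit or a reversed word ending there")
def pvScan (t : List Char) (j : Nat) : Option String :=
  if h : j < t.length then
    if PySem.Chars.isdigit t[j] then some (String.singleton t[j])
    else match pvAlphanum.find? (fun kv => decide (kv.1.reverse <:+ t.take (j+1))) with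
      | some kv => some kv.2
      | none => pvScan t (j+1)
  else none
termination_by t.length - j

-- an "event" at position k: a digit there, or a reversed digit word ending there
def pvEvt (t : List Char) (k : Nat) : Prop :=
  (∃ c, t[k]? = some c ∧ PySem.Chars.isdigit c = true) ∨
  (∃ kv ∈ pvAlphanum, kv.1.reverse <:+ t.take (k+1))

-- generic find? congruence on the searched list
theorem pv_find_congr {α : Type} (p q : α → Bool) :
    ∀ L : List α, (∀ a ∈ L, p a = q a) → L.find? p = L.find? q := by
  intro L
  induction L with
  | nil => intro _; rfl
  | cons a L ih =>
    intro h
    simp only [List.find?_cons, h a List.mem_cons_self]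
    cases q a
    · exact ih (fun x hx => h x (List.mem_cons_of_mem _ hx))
    · rfl

-- infix of a snoc: in the old list, or a suffix of the new one
theorem pv_infix_snoc (w xs : List Char) (c : Char) :
    w <:+: xs ++ [c] ↔ w <:+: xs ∨ w <:+ xs ++ [c] := by
  constructor
  · intro h
    rw [← List.reverse_infix] at h
    simp only [List.reverse_append, List.reverse_cons, List.reverse_nil, List.nil_append,
      List.singleton_append] at h
    rcases List.infix_cons_iff.mp h with h | h
    · right
      have : w.reverse <+: (xs ++ [c]).reverse := by simpa using h
      exact List.reverse_prefix.mp this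
    · left; rw [← List.reverse_infix]; simpa using h
  · rintro (h | h)
    · exact h.trans (List.prefix_append xs [c]).isInfix
    · exact h.isInfix

theorem pv_suffix_take_infix (w t : List Char) (k : Nat) (h : w <:+ t.take k) : w <:+: t :=
  h.isInfix.trans (List.take_prefix k t).isInfix

theorem pv_prefix_drop_infix (w t : List Char) (p : Nat) (h : w <+: t.drop p) : w <:+: t :=
  h.isInfix.trans (List.drop_suffix p t).isInfix

theorem pv_words_ne_nil : ∀ kv ∈ pvAlphanum, kv.1 ≠ [] := by decide

-- one non-event step of the reference scan
theorem pv_scan_step (t : List Char) (j : Nat) (hj : j < t.length) (hne : ¬ pvEvt t j) :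
    pvScan t j = pvScan t (j+1) := by
  rw [pvScan]
  rw [dif_pos hj]
  have hd : PySem.Chars.isdigit t[j] = false := by
    cases h : PySem.Chars.isdigit t[j]
    · rfl
    · exact absurd (Or.inl ⟨t[j], List.getElem?_eq_getElem hj, h⟩) hne
  rw [hd]
  simp only [Bool.false_eq_true, if_false]
  cases hf : pvAlphanum.find? (fun kv => decide (kv.1.reverse <:+ t.take (j+1))) with
  | some kv =>
    have hmem := List.mem_of_find?_eq_some hf
    have hp := List.find?_some hf
    simp only [decide_eq_true_eq] at hp
    exact absurd (Or.inr ⟨kv, hmem, hp⟩) hne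
  | none => rfl

theorem pv_scan_reach (t : List Char) (i : Nat) : ∀ j, j ≤ i → i < t.length →
    (∀ k, j ≤ k → k < i → ¬ pvEvt t k) → pvScan t j = pvScan t i := by
  induction i with
  | zero => intro j hj _ _; rw [Nat.le_zero.mp hj]
  | succ i ih =>
    intro j hj hi hno
    rcases Nat.lt_or_ge j (i+1) with hlt | hge
    · have hji : j ≤ i := by omega
      have h1 : pvScan t j = pvScan t i :=
        ih j hji (by omega) (fun k hk1 hk2 => hno k hk1 (by omega))
      rw [h1]
      exact pv_scan_step t i (by omega) (hno i hji (by omega))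
    · have : j = i + 1 := by omega
      rw [this]

theorem pv_scan_digit (t : List Char) (i : Nat) (hi : i < t.length) (j : Nat) (hj : j ≤ i)
    (hno : ∀ k, j ≤ k → k < i → ¬ pvEvt t k) (hd : PySem.Chars.isdigit t[i] = true) :
    pvScan t j = some (String.singleton t[i]) := by
  rw [pv_scan_reach t i j hj hi hno, pvScan, dif_pos hi, hd]
  simp

theorem pv_scan_word (t : List Char) (i : Nat) (hi : i < t.length) (j : Nat) (hj : j ≤ i)
    (hno : ∀ k, j ≤ k → k < i → ¬ pvEvt t k) (hd : PySem.Chars.isdigit t[i] = false)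
    (kv₀ : List Char × String)
    (hf : pvAlphanum.find? (fun kv => decide (kv.1.reverse <:+ t.take (i+1))) = some kv₀) :
    pvScan t j = some kv₀.2 := by
  rw [pv_scan_reach t i j hj hi hno, pvScan, dif_pos hi, hd]
  simp only [Bool.false_eq_true, if_false]
  rw [hf]

theorem pv_scan_none (t : List Char) : ∀ d j, t.length - j = d →
    (∀ k, j ≤ k → k < t.length → ¬ pvEvt t k) → pvScan t j = none := by
  intro d
  induction d with
  | zero =>
    intro j hd _
    rw [pvScan, dif_neg (by omega)]
  | succ d ih =>
    intro j hd hno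
    have hj : j < t.length := by omega
    rw [pv_scan_step t j hj (hno j (Nat.le_refl j) hj)]
    exact ih (j+1) (by omega) (fun k hk1 hk2 => hno k (by omega) hk2)

-- A's loop equals the reference scan (invariant: no reversed word occurs in the prefix read)
theorem pv_A_eq_scan (t : List Char) : ∀ d j, t.length - j = d →
    (∀ kv ∈ pvAlphanum, ¬ kv.1.reverse <:+: t.take j) →
    pvGoA (t.drop j) (t.take j).reverse = pvScan t j := by
  intro d
  induction d with
  | zero =>
    intro j hd _
    rw [List.drop_eq_nil_of_le (by omega), pvScan, dif_neg (by omega)]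
    rfl
  | succ d ih =>
    intro j hd hinv
    have hj : j < t.length := by omega
    rw [List.drop_eq_getElem_cons hj]
    rw [pvGoA, pvScan, dif_pos hj]
    have htake : t.take (j+1) = t.take j ++ [t[j]] := by
      rw [List.take_add_one, List.getElem?_eq_getElem hj]
      rfl
    cases hdg : PySem.Chars.isdigit t[j] with
    | true => simp
    | false =>
      simp only [Bool.false_eq_true, if_false]
      have hbuff : t[j] :: (t.take j).reverse = (t.take (j+1)).reverse := by
        rw [htake, List.reverse_append]
        rfl
      rw [hbuff]
      -- the freshly-extended buffer matches a key iff the reversed key ends at j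
      have hpred : ∀ kv ∈ pvAlphanum,
          PySem.Chars.isIn kv.1 ((t.take (j+1)).reverse)
            = decide (kv.1.reverse <:+ t.take (j+1)) := by
        intro kv hkv
        have h1 : PySem.Chars.isIn kv.1 ((t.take (j+1)).reverse) = true
            ↔ kv.1.reverse <:+ t.take (j+1) := by
          rw [PySem.Chars.isIn_iff_infix]
          constructor
          · intro h
            have h' : kv.1.reverse <:+: t.take (j+1) := by
              rw [← List.reverse_infix]
              simpa using h
            rw [htake] at h'
            rcases (pv_infix_snoc _ _ _).mp h' with h'' | h''
            · exact absurd h'' (hinv kv hkv)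
            · rw [htake]; exact h''
          · intro h
            have h' : kv.1.reverse <:+: t.take (j+1) := h.isInfix
            rw [← List.reverse_infix] at h'
            simpa using h'
        cases h2 : decide (kv.1.reverse <:+ t.take (j+1))
        · simp only [decide_eq_false_iff_not] at h2
          cases h3 : PySem.Chars.isIn kv.1 ((t.take (j+1)).reverse)
          · rfl
          · exact absurd (h1.mp h3) h2
        · simp only [decide_eq_true_eq] at h2
          exact h1.mpr h2
      rw [pv_find_congr _ _ pvAlphanum hpred]
      cases hf : pvAlphanum.find? (fun kv => decide (kv.1.reverse <:+ t.take (j+1))) with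
      | some kv => rfl
      | none =>
        have hinv' : ∀ kv ∈ pvAlphanum, ¬ kv.1.reverse <:+: t.take (j+1) := by
          intro kv hkv h
          rw [htake] at h
          rcases (pv_infix_snoc _ _ _).mp h with h' | h'
          · exact hinv kv hkv h'
          · have := List.find?_eq_none.mp hf kv hkv
            rw [← htake] at h'
            simp only [decide_eq_true_eq] at this
            exact this h'
        exact ih (j+1) (by omega) hinv' 

-- occurrences: a word ends at position k iff it occurs starting at k+1-|w|
theorem pv_occ_iff (w t : List Char) (k : Nat) (hk : k < t.length) :
    w <:+ t.take (k+1) ↔ ∃ p : Nat, p + w.length = k + 1 ∧ w <+: t.drop p := by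
  have hlt : (t.take (k+1)).length = k+1 := by
    rw [List.length_take]; omega
  constructor
  · intro hsuf
    have hlen : w.length ≤ k + 1 := by
      have := hsuf.length_le; omega
    refine ⟨k + 1 - w.length, by omega, ?_⟩
    have heq := List.suffix_iff_eq_drop.mp hsuf
    rw [hlt, List.drop_take] at heq
    have harith : k + 1 - (k + 1 - w.length) = w.length := by omega
    rw [harith] at heq
    exact List.prefix_iff_eq_take.mpr heq
  · rintro ⟨p, hp, hpre⟩
    have heq : t.take (k+1) = t.take p ++ w := by
      rw [← hp, List.take_add]
      congr 1
      exact (List.prefix_iff_eq_take.mp hpre).symm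
    rw [heq]
    exact List.suffix_append _ _

-- find? over a mapped key table, compared through the common value projection
theorem pv_find_map {α β γ : Type} (f : α → β) (v : α → γ) (w : β → γ)
    (p₁ : α → Bool) (p₂ : β → Bool) :
    ∀ L : List α, (∀ a ∈ L, p₂ (f a) = p₁ a) → (∀ a ∈ L, w (f a) = v a) →
      ((L.map f).find? p₂).map w = (L.find? p₁).map v := by
  intro L
  induction L with
  | nil => intro _ _; rfl
  | cons a L ih =>
    intro hp hv
    simp only [List.map_cons, List.find?_cons, hp a List.mem_cons_self]
    cases hpa : p₁ a with
    | true => simp [hv a List.mem_cons_self]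
    | false =>
      exact ih (fun x hx => hp x (List.mem_cons_of_mem _ hx))
        (fun x hx => hv x (List.mem_cons_of_mem _ hx))

theorem pv_rev_eq_map :
    pvRevWords = pvAlphanum.map (fun kv => (kv.1.reverse, kv.2)) := by rfl

-- Python's str.find, specialised: a successful find is the first occurrence
theorem pv_find_spec (t w : List Char) (h : PySem.Chars.find t w ≠ -1) :
    0 ≤ PySem.Chars.find t w ∧ w <+: t.drop (PySem.Chars.find t w).toNat ∧
      ∀ i : Nat, i < (PySem.Chars.find t w).toNat → ¬ w <+: t.drop i := by
  have hspec := PySem.Chars.findFrom_natCast_spec t w 0 (Nat.zero_le _)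
  rw [Nat.cast_zero, PySem.Chars.findFrom_zero] at hspec
  obtain ⟨h0, hp, hmin⟩ := hspec h
  exact ⟨h0, hp, fun i hi => hmin i (Nat.zero_le _) hi⟩

-- the enumerate loop: characterisation of the first digit found
theorem pv_enum_none (t : List Char) : ∀ s : Int,
    (PySem.List.enumerate t s).find? (fun ic => PySem.Chars.isdigit ic.2) = none →
    ∀ c ∈ t, PySem.Chars.isdigit c = false := by
  induction t with
  | nil => intro _ _ c hc; cases hc
  | cons x t ih =>
    intro s h c hc
    rw [PySem.List.enumerate_cons, List.find?_cons] at h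
    cases hx : PySem.Chars.isdigit x with
    | true => rw [hx] at h; cases h
    | false =>
      rw [hx] at h
      rcases List.mem_cons.mp hc with rfl | hc'
      · exact hx
      · exact ih (s+1) h c hc'

theorem pv_enum_some (t : List Char) : ∀ (s : Int) (ic : Int × Char),
    (PySem.List.enumerate t s).find? (fun ic => PySem.Chars.isdigit ic.2) = some ic →
    ∃ k : Nat, ic.1 = s + k ∧ t[k]? = some ic.2 ∧ PySem.Chars.isdigit ic.2 = true ∧
      ∀ j < k, ∀ c, t[j]? = some c → PySem.Chars.isdigit c = false := by
  induction t with
  | nil => intro s ic h; cases h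
  | cons x t ih =>
    intro s ic h
    rw [PySem.List.enumerate_cons, List.find?_cons] at h
    cases hx : PySem.Chars.isdigit x with
    | true =>
      rw [hx] at h
      injection h with h
      refine ⟨0, by simp [← h], by simp [← h], by rw [← h]; exact hx, by omega⟩
    | false =>
      rw [hx] at h
      obtain ⟨k, hk1, hk2, hk3, hk4⟩ := ih (s+1) ic h
      refine ⟨k+1, by push_cast; omega, by simpa using hk2, hk3, ?_⟩
      intro j hj c hc
      cases j with
      | zero =>
        simp only [List.getElem?_cons_zero, Option.some_inj] at hc
        rw [← hc]; exact hx
      | succ j =>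
        exact hk4 j (by omega) c (by simpa using hc)

-- the find loop: characterisation of the fold over _REV_WORDS
def pvIsEnd (t : List Char) (e : Int) (wd : List Char × String) : Bool :=
  PySem.Chars.find t wd.1 != -1 && decide (PySem.Chars.find t wd.1 + (wd.1.length : Int) - 1 = e)

theorem pv_best_stays_some (t : List Char) :
    ∀ (L : List (List Char × String)) (b : Int × String),
      L.foldl (pvBestStep t) (some b) ≠ none := by
  intro L
  induction L with
  | nil => intro b h; cases h
  | cons wd L ih =>
    intro b
    simp only [List.foldl_cons, pvBestStep]
    split
    · exact ih _
    · exact ih _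

theorem pv_best_none (t : List Char) :
    ∀ L : List (List Char × String), L.foldl (pvBestStep t) none = none →
      ∀ wd ∈ L, PySem.Chars.find t wd.1 = -1 := by
  intro L
  induction L with
  | nil => intro _ wd hwd; cases hwd
  | cons wd L ih =>
    intro h wd' hwd'
    rw [List.foldl_cons] at h
    cases hp : PySem.Chars.find t wd.1 == -1 with
    | false =>
      have hstep : pvBestStep t none wd
          = some (PySem.Chars.find t wd.1 + (wd.1.length : Int) - 1, wd.2) := by
        simp [pvBestStep, bne, hp]
      rw [hstep] at h
      exact absurd h (pv_best_stays_some t L _)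
    | true =>
      have hstep : pvBestStep t none wd = none := by
        simp [pvBestStep, bne, hp]
      rw [hstep] at h
      rcases List.mem_cons.mp hwd' with rfl | hmem
      · exact beq_iff_eq.mp hp
      · exact ih h wd' hmem

theorem pv_best_some_acc (t : List Char) :
    ∀ (L : List (List Char × String)) (b : Int × String) (e : Int) (d : String),
      L.foldl (pvBestStep t) (some b) = some (e, d) →
      (∀ wd ∈ L, PySem.Chars.find t wd.1 ≠ -1 →
        e ≤ PySem.Chars.find t wd.1 + (wd.1.length : Int) - 1) ∧
      ((e, d) = b ∨ (e < b.1 ∧ ∃ wd₀, L.find? (pvIsEnd t e) = some wd₀ ∧ wd₀.2 = d)) := by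
  intro L
  induction L with
  | nil =>
    intro b e d h
    simp only [List.foldl_nil, Option.some_inj] at h
    refine ⟨?_, Or.inl h.symm⟩
    intro wd hwd
    cases hwd
  | cons wd L ih =>
    intro b e d h
    rw [List.foldl_cons] at h
    cases hp : PySem.Chars.find t wd.1 == -1 with
    | true =>
      have hstep : pvBestStep t (some b) wd = some b := by
        simp [pvBestStep, bne, hp]
      rw [hstep] at h
      obtain ⟨hmin, hdisj⟩ := ih b e d h
      refine ⟨?_, ?_⟩
      · intro wd' hwd' hne
        rcases List.mem_cons.mp hwd' with rfl | hmem
        · exact absurd (beq_iff_eq.mp hp) hne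
        · exact hmin wd' hmem hne
      · rcases hdisj with hl | ⟨hlt, wd₀, hf, hv⟩
        · exact Or.inl hl
        · refine Or.inr ⟨hlt, wd₀, ?_, hv⟩
          rw [List.find?_cons]
          have hpe : pvIsEnd t e wd = false := by
            simp [pvIsEnd, bne, hp]
          rw [hpe]
          exact hf
    | false =>
      have hne : PySem.Chars.find t wd.1 ≠ -1 := by
        intro hx; rw [hx] at hp; simp at hp
      set e₁ : Int := PySem.Chars.find t wd.1 + (wd.1.length : Int) - 1 with he₁
      cases hc : decide (e₁ < b.1) with
      | true =>
        have hstep : pvBestStep t (some b) wd = some (e₁, wd.2) := by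
          simp only [pvBestStep, Option.elim, bne, hp, Bool.not_false, Bool.true_and, ← he₁, hc]
          rfl
        rw [hstep] at h
        obtain ⟨hmin, hdisj⟩ := ih _ e d h
        have hee₁ : e ≤ e₁ := by
          rcases hdisj with hl | ⟨hlt, _⟩
          · rw [show e = (e, d).1 from rfl, hl]
          · exact le_of_lt hlt
        refine ⟨?_, Or.inr ⟨by simp only [decide_eq_true_eq] at hc; omega, ?_⟩⟩
        · intro wd' hwd' hne'
          rcases List.mem_cons.mp hwd' with rfl | hmem
          · exact hee₁
          · exact hmin wd' hmem hne'
        · rcases hdisj with hl | ⟨hlt, wd₀, hf, hv⟩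
          · refine ⟨wd, ?_, by rw [show d = (e, d).2 from rfl, hl]⟩
            rw [List.find?_cons]
            have hpe : pvIsEnd t e wd = true := by
              have : e = e₁ := by rw [show e = (e, d).1 from rfl, hl]
              simp [pvIsEnd, bne, hp, ← he₁, this]
            rw [hpe]
          · refine ⟨wd₀, ?_, hv⟩
            rw [List.find?_cons]
            have hpe : pvIsEnd t e wd = false := by
              simp only [pvIsEnd, bne, hp, Bool.not_false, Bool.true_and, ← he₁,
                decide_eq_false_iff_not]
              omega
            rw [hpe]
            exact hf
      | false =>
        have hstep : pvBestStep t (some b) wd = some b := by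
          simp only [pvBestStep, Option.elim, bne, hp, Bool.not_false, Bool.true_and, ← he₁, hc]
          rfl
        rw [hstep] at h
        obtain ⟨hmin, hdisj⟩ := ih b e d h
        have hble : b.1 ≤ e₁ := by simp only [decide_eq_false_iff_not] at hc; omega
        have heb : e ≤ b.1 := by
          rcases hdisj with hl | ⟨hlt, _⟩
          · rw [show e = (e, d).1 from rfl, hl]
          · exact le_of_lt hlt
        refine ⟨?_, ?_⟩
        · intro wd' hwd' hne'
          rcases List.mem_cons.mp hwd' with rfl | hmem
          · omega
          · exact hmin wd' hmem hne'
        · rcases hdisj with hl | ⟨hlt, wd₀, hf, hv⟩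
          · exact Or.inl hl
          · refine Or.inr ⟨hlt, wd₀, ?_, hv⟩
            rw [List.find?_cons]
            have hpe : pvIsEnd t e wd = false := by
              simp only [pvIsEnd, bne, hp, Bool.not_false, Bool.true_and, ← he₁,
                decide_eq_false_iff_not]
              omega
            rw [hpe]
            exact hf

theorem pv_best_some (t : List Char) :
    ∀ (L : List (List Char × String)) (e : Int) (d : String),
      L.foldl (pvBestStep t) none = some (e, d) →
      (∀ wd ∈ L, PySem.Chars.find t wd.1 ≠ -1 →
        e ≤ PySem.Chars.find t wd.1 + (wd.1.length : Int) - 1) ∧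
      ∃ wd₀, L.find? (pvIsEnd t e) = some wd₀ ∧ wd₀.2 = d := by
  intro L
  induction L with
  | nil => intro e d h; cases h
  | cons wd L ih =>
    intro e d h
    rw [List.foldl_cons] at h
    cases hp : PySem.Chars.find t wd.1 == -1 with
    | true =>
      have hstep : pvBestStep t none wd = none := by
        simp [pvBestStep, bne, hp]
      rw [hstep] at h
      obtain ⟨hmin, wd₀, hf, hv⟩ := ih e d h
      refine ⟨?_, wd₀, ?_, hv⟩
      · intro wd' hwd' hne
        rcases List.mem_cons.mp hwd' with rfl | hmem
        · exact absurd (beq_iff_eq.mp hp) hne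
        · exact hmin wd' hmem hne
      · rw [List.find?_cons]
        have hpe : pvIsEnd t e wd = false := by simp [pvIsEnd, bne, hp]
        rw [hpe]
        exact hf
    | false =>
      set e₁ : Int := PySem.Chars.find t wd.1 + (wd.1.length : Int) - 1 with he₁
      have hstep : pvBestStep t none wd = some (e₁, wd.2) := by
        simp [pvBestStep, bne, hp, ← he₁]
      rw [hstep] at h
      obtain ⟨hmin, hdisj⟩ := pv_best_some_acc t L _ e d h
      have hee₁ : e ≤ e₁ := by
        rcases hdisj with hl | ⟨hlt, _⟩
        · rw [show e = (e, d).1 from rfl, hl]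
        · exact le_of_lt hlt
      refine ⟨?_, ?_⟩
      · intro wd' hwd' hne'
        rcases List.mem_cons.mp hwd' with rfl | hmem
        · exact hee₁
        · exact hmin wd' hmem hne'
      · rcases hdisj with hl | ⟨hlt, wd₀, hf, hv⟩
        · refine ⟨wd, ?_, by rw [show d = (e, d).2 from rfl, hl]⟩
          rw [List.find?_cons]
          have hpe : pvIsEnd t e wd = true := by
            have : e = e₁ := by rw [show e = (e, d).1 from rfl, hl]
            simp [pvIsEnd, bne, hp, ← he₁, this]
          rw [hpe]
        · refine ⟨wd₀, ?_, hv⟩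
          rw [List.find?_cons]
          have hpe : pvIsEnd t e wd = false := by
            simp only [pvIsEnd, bne, hp, Bool.not_false, Bool.true_and, ← he₁,
              decide_eq_false_iff_not]
            omega
          rw [hpe]
          exact hf

theorem pv_rev_len : ∀ wd ∈ pvRevWords, 1 ≤ wd.1.length := by decide

-- A's loop on the whole text is the reference scan from position 0
theorem pv_A_main (t : List Char) : pvGoA t [] = pvScan t 0 := by
  have h := pv_A_eq_scan t t.length 0 (by omega) ?_
  · simpa using h
  · intro kv hkv h
    rw [List.take_zero] at h
    have := List.eq_nil_of_infix_nil h
    have hne := pv_words_ne_nil kv hkv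
    simp only [List.reverse_eq_nil_iff] at this
    exact hne this

-- if no reversed word occurs in the text at all, no word event happens anywhere
theorem pv_no_word_of_none (t : List Char)
    (h : ∀ wd ∈ pvRevWords, PySem.Chars.find t wd.1 = -1) :
    ∀ k : Nat, ¬ (∃ kv ∈ pvAlphanum, kv.1.reverse <:+ t.take (k+1)) := by
  rintro k ⟨kv, hkv, hsuf⟩
  have hmem : (kv.1.reverse, kv.2) ∈ pvRevWords := by
    rw [pv_rev_eq_map]; exact List.mem_map.mpr ⟨kv, hkv, rfl⟩
  have hinf : kv.1.reverse <:+: t := pv_suffix_take_infix _ _ _ hsuf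
  exact (PySem.Chars.find_eq_neg_one_iff t kv.1.reverse).mp (h _ hmem) hinf

-- below the minimal completion index, no word event happens
theorem pv_no_word_below (t : List Char) (e : Int)
    (hmin : ∀ wd ∈ pvRevWords, PySem.Chars.find t wd.1 ≠ -1 →
      e ≤ PySem.Chars.find t wd.1 + (wd.1.length : Int) - 1) :
    ∀ k : Nat, (k : Int) < e → k < t.length →
      ¬ (∃ kv ∈ pvAlphanum, kv.1.reverse <:+ t.take (k+1)) := by
  rintro k hk hkn ⟨kv, hkv, hsuf⟩
  obtain ⟨p, hp, hpre⟩ := (pv_occ_iff kv.1.reverse t k hkn).mp hsuf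
  have hmem : (kv.1.reverse, kv.2) ∈ pvRevWords := by
    rw [pv_rev_eq_map]; exact List.mem_map.mpr ⟨kv, hkv, rfl⟩
  have hfne : PySem.Chars.find t kv.1.reverse ≠ -1 := by
    intro hx
    exact (PySem.Chars.find_eq_neg_one_iff t kv.1.reverse).mp hx
      (pv_prefix_drop_infix _ t p hpre)
  obtain ⟨h0, hqpre, hqmin⟩ := pv_find_spec t kv.1.reverse hfne
  have hqp : (PySem.Chars.find t kv.1.reverse).toNat ≤ p := by
    exact Nat.not_lt.mp (fun hgt => hqmin p hgt hpre)
  have hle := hmin _ hmem hfne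
  have hfq : PySem.Chars.find t kv.1.reverse
      = ((PySem.Chars.find t kv.1.reverse).toNat : Int) := (Int.toNat_of_nonneg h0).symm
  rw [hfq] at hle
  simp only at hle hk hp
  omega

-- at the minimal completion index, "this reversed word ends here" is
-- exactly "this word's first occurrence completes at e"
theorem pv_end_pred_iff (t : List Char) (e : Int) (i : Nat) (hie : (i : Int) = e)
    (hin : i < t.length)
    (hmin : ∀ wd ∈ pvRevWords, PySem.Chars.find t wd.1 ≠ -1 →
      e ≤ PySem.Chars.find t wd.1 + (wd.1.length : Int) - 1) :
    ∀ kv ∈ pvAlphanum,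
      pvIsEnd t e (kv.1.reverse, kv.2) = decide (kv.1.reverse <:+ t.take (i+1)) := by
  intro kv hkv
  have hmem : (kv.1.reverse, kv.2) ∈ pvRevWords := by
    rw [pv_rev_eq_map]; exact List.mem_map.mpr ⟨kv, hkv, rfl⟩
  have hiff : pvIsEnd t e (kv.1.reverse, kv.2) = true ↔ kv.1.reverse <:+ t.take (i+1) := by
    constructor
    · intro h
      simp only [pvIsEnd, Bool.and_eq_true, bne_iff_ne, ne_eq, decide_eq_true_eq] at h
      obtain ⟨hfne, hfe⟩ := h
      obtain ⟨h0, hqpre, _⟩ := pv_find_spec t kv.1.reverse hfne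
      refine (pv_occ_iff kv.1.reverse t i hin).mpr
        ⟨(PySem.Chars.find t kv.1.reverse).toNat, ?_, hqpre⟩
      have hfq : PySem.Chars.find t kv.1.reverse
          = ((PySem.Chars.find t kv.1.reverse).toNat : Int) := (Int.toNat_of_nonneg h0).symm
      rw [hfq] at hfe
      have hlen : 1 ≤ kv.1.reverse.length := pv_rev_len _ hmem
      omega
    · intro hsuf
      obtain ⟨p, hp, hpre⟩ := (pv_occ_iff kv.1.reverse t i hin).mp hsuf
      have hfne : PySem.Chars.find t kv.1.reverse ≠ -1 := by
        intro hx
        exact (PySem.Chars.find_eq_neg_one_iff t kv.1.reverse).mp hx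
          (pv_prefix_drop_infix _ t p hpre)
      obtain ⟨h0, hqpre, hqmin⟩ := pv_find_spec t kv.1.reverse hfne
      have hqp : (PySem.Chars.find t kv.1.reverse).toNat ≤ p := by
        exact Nat.not_lt.mp (fun hgt => hqmin p hgt hpre)
      have hle := hmin _ hmem hfne
      have hpl : (((kv.1.reverse, kv.2) : List Char × String).1.length : Int)
          = (kv.1.reverse.length : Int) := rfl
      rw [hpl] at hle
      have hfq : PySem.Chars.find t kv.1.reverse
          = ((PySem.Chars.find t kv.1.reverse).toNat : Int) := (Int.toNat_of_nonneg h0).symm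
      simp only [pvIsEnd, Bool.and_eq_true, bne_iff_ne, ne_eq, decide_eq_true_eq]
      refine ⟨hfne, ?_⟩
      rw [hfq] at hle ⊢
      have hlen : 1 ≤ kv.1.reverse.length := pv_rev_len _ hmem
      omega
  cases h2 : decide (kv.1.reverse <:+ t.take (i+1))
  · simp only [decide_eq_false_iff_not] at h2
    cases h3 : pvIsEnd t e (kv.1.reverse, kv.2)
    · rfl
    · exact absurd (hiff.mp h3) h2
  · simp only [decide_eq_true_eq] at h2
    exact hiff.mpr h2

-- B's fold result, read at the scan level: completion index, quietness below it,
-- and the first matching key at it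
theorem pv_word_case (t : List Char) (e : Int) (d : String)
    (hB : pvRevWords.foldl (pvBestStep t) none = some (e, d)) :
    ∃ i : Nat, (i : Int) = e ∧ i < t.length ∧
      (∀ k : Nat, k < i → ¬ (∃ kv ∈ pvAlphanum, kv.1.reverse <:+ t.take (k+1))) ∧
      ∃ kv₀, pvAlphanum.find? (fun kv => decide (kv.1.reverse <:+ t.take (i+1))) = some kv₀ ∧
        kv₀.2 = d := by
  obtain ⟨hmin, wd₀, hf, hv⟩ := pv_best_some t pvRevWords e d hB
  have hmem₀ := List.mem_of_find?_eq_some hf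
  have hp₀ := List.find?_some hf
  simp only [pvIsEnd, Bool.and_eq_true, bne_iff_ne, ne_eq, decide_eq_true_eq] at hp₀
  obtain ⟨hfne, hfe⟩ := hp₀
  obtain ⟨h0, hqpre, _⟩ := pv_find_spec t wd₀.1 hfne
  have hlen : 1 ≤ wd₀.1.length := pv_rev_len _ hmem₀
  have hfq : PySem.Chars.find t wd₀.1
      = ((PySem.Chars.find t wd₀.1).toNat : Int) := (Int.toNat_of_nonneg h0).symm
  have he0 : 0 ≤ e := by rw [hfq] at hfe; omega
  have hie : ((e.toNat : Nat) : Int) = e := Int.toNat_of_nonneg he0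
  have hlq := hqpre.length_le
  rw [List.length_drop] at hlq
  have hin : e.toNat < t.length := by rw [hfq] at hfe; omega
  refine ⟨e.toNat, hie, hin, ?_, ?_⟩
  · intro k hk
    exact pv_no_word_below t e hmin k (by omega) (by omega)
  · have hmap := pv_find_map (fun kv => (kv.1.reverse, kv.2)) Prod.snd Prod.snd
      (fun kv => decide (kv.1.reverse <:+ t.take (e.toNat+1))) (pvIsEnd t e) pvAlphanum
      (pv_end_pred_iff t e e.toNat hie hin hmin) (fun a _ => rfl)
    rw [← pv_rev_eq_map, hf] at hmap
    cases hfa : pvAlphanum.find? (fun kv => decide (kv.1.reverse <:+ t.take (e.toNat+1))) with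
    | none => rw [hfa] at hmap; cases hmap
    | some kv₀ =>
      rw [hfa] at hmap
      simp only [Option.map_some, Option.some_inj] at hmap
      exact ⟨kv₀, rfl, by rw [← hmap, hv]⟩

-- ===== VERDICT (by name: the statement is the Claim_ definition above) =====
theorem get_number_from_mixed_reversed_text_spec : Claim_equal_get_number_from_mixed_reversed_text := by
  intro text _
  unfold Spec_get_number_from_mixed_reversed_text get_number_from_mixed_reversed_text
    get_number_from_mixed_reversed_text_alt
  rw [pv_A_main text.toList]
  cases hFD : (PySem.List.enumerate text.toList).find? (fun ic => PySem.Chars.isdigit ic.2) with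
  | none =>
    have hnd := pv_enum_none text.toList 0 hFD
    cases hB : pvRevWords.foldl (pvBestStep text.toList) none with
    | none =>
      simp only [hFD, hB]
      refine pv_scan_none text.toList text.toList.length 0 (by omega) ?_
      rintro k _ _ (⟨c, hc, hdc⟩ | hw)
      · exact absurd (hnd c (List.mem_of_getElem? hc)) (by rw [hdc]; decide)
      · exact pv_no_word_of_none text.toList (pv_best_none text.toList _ hB) k hw
    | some b =>
      obtain ⟨e, d⟩ := b
      simp only [hFD, hB]
      obtain ⟨i, hie, hin, hquiet, kv₀, hfa, hkd⟩ := pv_word_case text.toList e d hB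
      rw [← hkd]
      refine pv_scan_word text.toList i hin 0 (Nat.zero_le _) ?_ ?_ kv₀ hfa
      · rintro k _ hk (⟨c, hc, hdc⟩ | hw)
        · exact absurd (hnd c (List.mem_of_getElem? hc)) (by rw [hdc]; decide)
        · exact hquiet k hk hw
      · exact hnd _ (List.getElem_mem hin)
  | some ic =>
    obtain ⟨k, hk1, hk2, hk3, hk4⟩ := pv_enum_some text.toList 0 ic hFD
    obtain ⟨hkn, hkc⟩ := List.getElem?_eq_some_iff.mp hk2
    cases hB : pvRevWords.foldl (pvBestStep text.toList) none with
    | none =>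
      simp only [hFD, hB]
      have := pv_scan_digit text.toList k hkn 0 (Nat.zero_le _) ?_ (by rw [hkc]; exact hk3)
      · rw [this, hkc]
      · rintro j _ hj (⟨c, hc, hdc⟩ | hw)
        · exact absurd (hk4 j hj c hc) (by rw [hdc]; decide)
        · exact pv_no_word_of_none text.toList (pv_best_none text.toList _ hB) j hw
    | some b =>
      obtain ⟨e, d⟩ := b
      simp only [hFD, hB]
      obtain ⟨hmin, _⟩ := pv_best_some text.toList pvRevWords e d hB
      split_ifs with hle
      · -- the first digit completes no later: the scan hits it first
        rw [hk1] at hle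
        simp only [Int.zero_add] at hle
        have := pv_scan_digit text.toList k hkn 0 (Nat.zero_le _) ?_ (by rw [hkc]; exact hk3)
        · rw [this, hkc]
        · rintro j _ hj (⟨c, hc, hdc⟩ | hw)
          · exact absurd (hk4 j hj c hc) (by rw [hdc]; decide)
          · exact pv_no_word_below text.toList e hmin j (by omega) (by omega) hw
      · -- a word completes strictly earlier
        rw [hk1] at hle
        simp only [Int.zero_add, not_le] at hle
        obtain ⟨i, hie, hin, hquiet, kv₀, hfa, hkd⟩ := pv_word_case text.toList e d hB
        rw [← hkd]
        have hik : i < k := by omega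
        refine pv_scan_word text.toList i hin 0 (Nat.zero_le _) ?_ ?_ kv₀ hfa
        · rintro j _ hj (⟨c, hc, hdc⟩ | hw)
          · exact absurd (hk4 j (by omega) c hc) (by rw [hdc]; decide)
          · exact hquiet j hj hw
        · exact hk4 i hik _ (List.getElem?_eq_getElem hin)
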